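-- pv_equiv track=rewrite | github.com/alexbibihere/QuantDinger | test_hama_algorithm.py | determine_trend
-- ===== SOURCE A (Python) =====
-- def determine_trend(ha_klines):
--     """判断趋势"""
--     if len(ha_klines) < 10:
--         return 'sideways'
--
--     recent = ha_klines[-10:]
--     bullish_count = sum(1 for k in recent if k['close'] > k['open'])
--     bearish_count = sum(1 for k in recent if k['close'] < k['open'])
--
--     consecutive_bullish = 0
--     consecutive_bearish = 0
--
--     for k in recent:
--         if k['close'] > k['open']:
--             consecutive_bullish += 1
--             consecutive_bearish = 0
--         elif k['close'] < k['open']: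
--             consecutive_bearish += 1
--             consecutive_bullish = 0
--         else:
--             consecutive_bullish = 0
--             consecutive_bearish = 0
--
--     if consecutive_bullish >= 5 or bullish_count >= 7:
--         return 'uptrend'
--     elif consecutive_bearish >= 5 or bearish_count >= 7:
--         return 'downtrend'
--     else:
--         return 'sideways'
-- ===== SOURCE B (Python) =====
-- def determine_trend(ha_klines):
--     """判断趋势 — counts via sum/count, streaks via reverse early-break scans."""
--     if len(ha_klines) < 10:
--         return 'sideways'
--
--     recent = ha_klines[-10:]
--     bullish_count = sum(1 for k in recent if k['close'] > k['open'])
--     bearish_count = sum(1 for k in recent if k['close'] < k['open'])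
--
--     trailing_bullish = 0
--     for k in reversed(recent):
--         if k['close'] > k['open']:
--             trailing_bullish += 1
--         else:
--             break
--
--     trailing_bearish = 0
--     for k in reversed(recent):
--         if k['close'] < k['open']:
--             trailing_bearish += 1
--         else:
--             break
--
--     if trailing_bullish >= 5 or bullish_count >= 7:
--         return 'uptrend'
--     if trailing_bearish >= 5 or bearish_count >= 7:
--         return 'downtrend'
--     return 'sideways'
-- ===== Notes on version B (the rewrite author's own statement) =====
-- stated objective: alternative
-- what changed: The forward reset-loop maintaining two consecutive counters over all 10 candles is replaced by two reverse early-terminating scans that count the trailing bullish/bearish streak directly (the forward loop's final counter equals the trailing streak length).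
import Mathlib
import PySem

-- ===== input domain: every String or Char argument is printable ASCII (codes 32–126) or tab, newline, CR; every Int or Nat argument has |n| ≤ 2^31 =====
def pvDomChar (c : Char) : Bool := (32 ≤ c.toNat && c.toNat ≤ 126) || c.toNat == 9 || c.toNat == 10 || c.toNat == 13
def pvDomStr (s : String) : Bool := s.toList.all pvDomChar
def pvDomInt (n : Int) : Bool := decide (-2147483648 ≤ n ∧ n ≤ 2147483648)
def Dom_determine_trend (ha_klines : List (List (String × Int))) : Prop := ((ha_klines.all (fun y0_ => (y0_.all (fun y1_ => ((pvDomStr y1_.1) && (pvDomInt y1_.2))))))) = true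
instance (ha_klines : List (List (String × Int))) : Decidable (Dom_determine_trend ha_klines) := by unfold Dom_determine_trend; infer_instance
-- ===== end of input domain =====

-- B replaces A's forward reset-loop for the consecutive counters by two reverse
-- early-terminating scans counting the trailing bullish/bearish streak (alternative decomposition).


-- shared accessors: k['close'] / k['open'] (first-match lookup; Pre_ guarantees the keys exist,
-- so the .getD 0 default is never reached on admitted inputs)
def pvClose (k : List (String × Int)) : Int := (k.lookup "close").getD 0
def pvOpen (k : List (String × Int)) : Int := (k.lookup "open").getD 0

-- ===== PORT A =====
-- the forward loop body: consecutive_bullish / consecutive_bearish update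
def pvStepA (st : Int × Int) (k : List (String × Int)) : Int × Int :=
  if pvClose k > pvOpen k then (st.1 + 1, 0)
  else if pvClose k < pvOpen k then (0, st.2 + 1)
  else (0, 0)

def determine_trend (ha_klines : List (List (String × Int))) : String :=
  if ha_klines.length < 10 then "sideways"
  else
    let recent := PySem.List.slice ha_klines (some (-10)) none
    let bullish_count : Int := recent.foldl (fun acc k => if pvClose k > pvOpen k then acc + 1 else acc) 0
    let bearish_count : Int := recent.foldl (fun acc k => if pvClose k < pvOpen k then acc + 1 else acc) 0
    let st := recent.foldl pvStepA (0, 0)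
    if st.1 ≥ 5 ∨ bullish_count ≥ 7 then "uptrend"
    else if st.2 ≥ 5 ∨ bearish_count ≥ 7 then "downtrend"
    else "sideways"

-- ===== PORT B =====
def determine_trend_alt (ha_klines : List (List (String × Int))) : String :=
  if ha_klines.length < 10 then "sideways"
  else
    let recent := PySem.List.slice ha_klines (some (-10)) none
    let bullish_count : Nat := recent.countP (fun k => pvClose k > pvOpen k)
    let bearish_count : Nat := recent.countP (fun k => pvClose k < pvOpen k)
    -- reverse early-break scans = takeWhile on the reversed window
    let trailing_bullish : Nat := (recent.reverse.takeWhile (fun k => pvClose k > pvOpen k)).length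
    let trailing_bearish : Nat := (recent.reverse.takeWhile (fun k => pvClose k < pvOpen k)).length
    if trailing_bullish ≥ 5 ∨ bullish_count ≥ 7 then "uptrend"
    else if trailing_bearish ≥ 5 ∨ bearish_count ≥ 7 then "downtrend"
    else "sideways"

-- ===== PRECONDITION & SPEC =====
-- Pre_ excludes exactly the inputs on which A raises KeyError: a window of ≥10 candles whose
-- last 10 do not all carry both the 'close' and the 'open' key.
def Pre_determine_trend (ha_klines : List (List (String × Int))) : Prop :=
  ha_klines.length < 10 ∨
    ∀ k ∈ ha_klines.drop (ha_klines.length - 10),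
      (k.lookup "close").isSome ∧ (k.lookup "open").isSome
instance (ha_klines : List (List (String × Int))) : Decidable (Pre_determine_trend ha_klines) := by
  unfold Pre_determine_trend; infer_instance

def pvWitness_determine_trend : (List (List (String × Int))) :=
  List.replicate 10 [("close", 1), ("open", 0)]

def Spec_determine_trend (ha_klines : List (List (String × Int))) (out : String) : Prop := out = determine_trend_alt ha_klines
instance (ha_klines : List (List (String × Int))) (out : String) : Decidable (Spec_determine_trend ha_klines out) := by unfold Spec_determine_trend; infer_instance

-- ===== CLAIM (what is proved, stated in full; the proofs are below) =====
def Claim_equal_determine_trend : Prop := ∀ (ha_klines : List (List (String × Int))), Dom_determine_trend ha_klines → Pre_determine_trend ha_klines → Spec_determine_trend ha_klines (determine_trend ha_klines)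

-- ===== LEMMAS AND PROOFS =====

-- A's forward reset-loop ends with exactly the trailing streak lengths B scans for.
lemma foldl_stepA_eq_trailing (l : List (List (String × Int))) :
    l.foldl pvStepA (0, 0) =
      (((l.reverse.takeWhile (fun k => pvClose k > pvOpen k)).length : Int),
       ((l.reverse.takeWhile (fun k => pvClose k < pvOpen k)).length : Int)) := by
  induction l using List.reverseRecOn with
  | nil => simp
  | append_singleton l x ih =>
      rw [List.foldl_append, List.foldl_cons, List.foldl_nil, ih]
      simp only [List.reverse_append, List.reverse_cons, List.reverse_nil, List.nil_append,
        List.cons_append, List.takeWhile]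
      unfold pvStepA
      by_cases h1 : pvClose x > pvOpen x
      · simp [h1, not_lt_of_gt h1]
      · by_cases h2 : pvClose x < pvOpen x
        · simp [h1, h2]
        · simp [h1, h2]

lemma foldl_count_int (l : List (List (String × Int))) (p : List (String × Int) → Prop)
    [DecidablePred p] :
    l.foldl (fun acc k => if p k then acc + 1 else acc) (0 : Int) = (l.countP (fun k => decide (p k)) : Int) := by
  rw [PySem.List.foldl_ite_add_one]
  simp

-- ===== VERDICT (by name: the statement is the Claim_ definition above) =====
theorem determine_trend_spec : Claim_equal_determine_trend := by
  intro ha _ _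
  unfold Spec_determine_trend determine_trend determine_trend_alt
  by_cases hlen : ha.length < 10
  · simp [hlen]
  · simp only [hlen, if_false]
    rw [foldl_stepA_eq_trailing,
        foldl_count_int _ (fun k => pvClose k > pvOpen k),
        foldl_count_int _ (fun k => pvClose k < pvOpen k)]
    push_cast
    norm_num
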